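-- pv_equiv track=rewrite | github.com/Eydas/Chatbot | preprocess_lines.py | create_dialogue_lists
-- ===== SOURCE A (Python) =====
-- CONV_SEPERATOR = "########\n"
--
-- LINE_MAX_ALLOWED_LENGTH = 20
--
-- def is_allowed_length(line):
-- 	return len(line.split(" ")) <= LINE_MAX_ALLOWED_LENGTH
--
-- def create_dialogue_lists(line_list):
-- 	dialogue_list = []
-- 	in_conv = False
-- 	for i in range(0, len(line_list) - 1):
-- 		datapoint1 = line_list[i]
-- 		datapoint2 = line_list[i+1]
-- 		if datapoint2[0] - datapoint1[0] == 1 and datapoint1[1] != datapoint2[1] and is_allowed_length(datapoint1[2]) and is_allowed_length(datapoint2[2]):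
-- 			if not in_conv:
-- 				dialogue_list.append(datapoint1[2])
-- 				in_conv = True
-- 			dialogue_list.append(datapoint2[2])
-- 		else:
-- 			if in_conv:
-- 				dialogue_list.append(CONV_SEPERATOR)
-- 				in_conv = False
-- 	return dialogue_list
-- ===== SOURCE B (Python) =====
-- CONV_SEPERATOR = "########\n"
--
-- LINE_MAX_ALLOWED_LENGTH = 20
--
-- def is_allowed_length(line):
--     return len(line.split(" ")) <= LINE_MAX_ALLOWED_LENGTH
--
-- def create_dialogue_lists(line_list):
--     # Stateless formulation: each adjacent pair contributes a locally determined
--     # fragment depending only on good(i-1) and good(i) (no conversation state is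
--     # threaded through the scan); correct because A's in_conv flag after pair i
--     # always equals good(i).
--     def good(a, b):
--         return (b[0] - a[0] == 1 and a[1] != b[1]
--                 and is_allowed_length(a[2]) and is_allowed_length(b[2]))
--     pairs = list(zip(line_list, line_list[1:]))
--     goods = [good(a, b) for a, b in pairs]
--     prevs = [False] + goods[:-1]
--     def contrib(g, pg, a, b):
--         if g:
--             return ([] if pg else [a[2]]) + [b[2]]
--         return [CONV_SEPERATOR] if pg else []
--     return [s for g, pg, (a, b) in zip(goods, prevs, pairs)
--               for s in contrib(g, pg, a, b)]
-- ===== Notes on version B (the rewrite author's own statement) =====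
-- stated objective: alternative
-- what changed: Replaces A's stateful scan (in_conv flag threaded through the loop) by a stateless formulation: precompute the good-pair table and its shifted predecessor table, then the output is the flat concatenation of per-pair fragments each determined locally by (good(i-1), good(i)), with no conversation state carried across iterations.
import Mathlib
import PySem

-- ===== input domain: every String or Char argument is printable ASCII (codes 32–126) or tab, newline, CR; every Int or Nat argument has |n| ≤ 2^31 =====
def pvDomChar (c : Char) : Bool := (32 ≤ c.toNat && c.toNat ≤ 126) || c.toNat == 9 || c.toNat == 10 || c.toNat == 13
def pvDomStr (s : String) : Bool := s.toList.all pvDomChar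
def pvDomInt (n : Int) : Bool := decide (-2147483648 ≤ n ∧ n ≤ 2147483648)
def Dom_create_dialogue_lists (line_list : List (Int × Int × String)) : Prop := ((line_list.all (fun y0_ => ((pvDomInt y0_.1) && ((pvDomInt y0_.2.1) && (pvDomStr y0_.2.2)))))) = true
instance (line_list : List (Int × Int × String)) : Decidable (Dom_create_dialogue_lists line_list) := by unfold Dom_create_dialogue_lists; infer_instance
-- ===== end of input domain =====

-- B replaces A's stateful scan by a stateless formulation: a good-pair table plus its
-- shifted copy, each pair contributing a locally determined fragment; objective:
-- alternative decomposition, same cost.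

-- ===== PORT A =====
def CONV_SEPERATOR : String := "########\n"

def is_allowed_length (line : String) : Bool :=
  decide ((((PySem.Str.split? line " ").getD []).length) ≤ 20)

-- loop body of A's for-loop (i is always in range, so pyGetD's default is never read)
def aBody (line_list : List (Int × Int × String)) (st : List String × Bool) (i : Int) :
    List String × Bool :=
  let d1 := PySem.List.pyGetD line_list i (0, 0, "")
  let d2 := PySem.List.pyGetD line_list (i + 1) (0, 0, "")
  if (decide (d2.1 - d1.1 = 1) && decide (d1.2.1 ≠ d2.2.1)
      && is_allowed_length d1.2.2 && is_allowed_length d2.2.2) then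
    let st1 := if st.2 = false then (st.1 ++ [d1.2.2], true) else st
    (st1.1 ++ [d2.2.2], true)
  else
    if st.2 then (st.1 ++ [CONV_SEPERATOR], false) else st

def create_dialogue_lists (line_list : List (Int × Int × String)) : List String :=
  ((PySem.List.pyRange 0 ((line_list.length : Int) - 1) 1).foldl
    (aBody line_list) ([], false)).1

-- ===== PORT B =====
def goodPair (p : (Int × Int × String) × (Int × Int × String)) : Bool :=
  decide (p.2.1 - p.1.1 = 1) && decide (p.1.2.1 ≠ p.2.2.1)
    && is_allowed_length p.1.2.2 && is_allowed_length p.2.2.2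

-- the locally determined fragment of one pair: (good here, (good at previous pair, pair))
def contribB (x : Bool × (Bool × ((Int × Int × String) × (Int × Int × String)))) :
    List String :=
  if x.1 then (if x.2.1 then [] else [x.2.2.1.2.2]) ++ [x.2.2.2.2.2]
  else if x.2.1 then [CONV_SEPERATOR] else []

def create_dialogue_lists_alt (line_list : List (Int × Int × String)) : List String :=
  let pairs := line_list.zip (line_list.drop 1)
  let goods := pairs.map goodPair
  let prevs := false :: goods.dropLast
  (goods.zip (prevs.zip pairs)).flatMap contribB

-- ===== PRECONDITION & SPEC =====
def Spec_create_dialogue_lists (line_list : List (Int × Int × String)) (out : List String) : Prop := out = create_dialogue_lists_alt line_list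
instance (line_list : List (Int × Int × String)) (out : List String) : Decidable (Spec_create_dialogue_lists line_list out) := by unfold Spec_create_dialogue_lists; infer_instance

-- ===== CLAIM (what is proved, stated in full; the proofs are below) =====
def Claim_equal_create_dialogue_lists : Prop := ∀ (line_list : List (Int × Int × String)), Dom_create_dialogue_lists line_list → Spec_create_dialogue_lists line_list (create_dialogue_lists line_list)

-- ===== LEMMAS AND PROOFS =====

-- A's loop body, re-expressed on a (line, next line) pair
def aStep (st : List String × Bool) (p : (Int × Int × String) × (Int × Int × String)) :
    List String × Bool :=
  if goodPair p then
    let st1 := if st.2 = false then (st.1 ++ [p.1.2.2], true) else st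
    (st1.1 ++ [p.2.2.2], true)
  else
    if st.2 then (st.1 ++ [CONV_SEPERATOR], false) else st

-- the tail A's loop still produces from state b
def aRec (l : List ((Int × Int × String) × (Int × Int × String))) (b : Bool) : List String :=
  match l with
  | [] => []
  | p :: r =>
    if goodPair p then
      if b then p.2.2.2 :: aRec r true else p.1.2.2 :: p.2.2.2 :: aRec r true
    else
      if b then CONV_SEPERATOR :: aRec r false else aRec r false

theorem foldl_aStep (l : List ((Int × Int × String) × (Int × Int × String))) :
    ∀ (acc : List String) (b : Bool), (l.foldl aStep (acc, b)).1 = acc ++ aRec l b := by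
  induction l with
  | nil => simp [aRec]
  | cons p r ih =>
    intro acc b
    by_cases hg : goodPair p = true
    · cases b <;> simp [aStep, aRec, hg, ih]
    · simp only [Bool.not_eq_true] at hg
      cases b <;> simp [aStep, aRec, hg, ih]

-- B's stateless flatMap equals A's tail recursion: the 'previous good' entry carried in
-- the shifted table plays exactly the role of A's in_conv flag.
theorem flatMap_contrib_eq_aRec
    (l : List ((Int × Int × String) × (Int × Int × String))) :
    ∀ (b : Bool),
      ((l.map goodPair).zip ((b :: (l.map goodPair).dropLast).zip l)).flatMap contribB
        = aRec l b := by
  induction l with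
  | nil => intro b; simp [aRec]
  | cons p r ih =>
    intro b
    cases r with
    | nil =>
      by_cases hg : goodPair p = true
      · cases b <;> simp [contribB, aRec, hg]
      · simp only [Bool.not_eq_true] at hg
        cases b <;> simp [contribB, aRec, hg]
    | cons q t =>
      have hd : ((goodPair p :: (q :: t).map goodPair)).dropLast
          = goodPair p :: ((q :: t).map goodPair).dropLast := by
        simp [List.dropLast_cons_of_ne_nil]
      rw [show ((p :: q :: t).map goodPair) = goodPair p :: (q :: t).map goodPair from rfl,
        hd, List.zip_cons_cons, List.zip_cons_cons, List.flatMap_cons, ih (goodPair p)]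
      by_cases hg : goodPair p = true
      · cases b <;> simp [contribB, aRec, hg]
      · simp only [Bool.not_eq_true] at hg
        cases b <;> simp [contribB, aRec, hg]

theorem aBody_eq_aStep (ll : List (Int × Int × String)) (st : List String × Bool) (i : Int)
    (h0 : 0 ≤ i) (h : i < ((ll.zip (ll.drop 1)).length : Int)) :
    aBody ll st i = aStep st (PySem.List.pyGetD (ll.zip (ll.drop 1)) i ((0,0,""),(0,0,""))) := by
  have hlen : (ll.zip (ll.drop 1)).length = ll.length - 1 := by
    simp [List.length_zip]
  have hi1 : i.toNat < (ll.zip (ll.drop 1)).length := by omega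
  have hi : i.toNat < ll.length := by omega
  have hi' : i.toNat + 1 < ll.length := by omega
  rw [PySem.List.pyGetD_eq_getElem _ _ h0 h]
  have h1 : PySem.List.pyGetD ll i (0,0,"") = ll[i.toNat] :=
    PySem.List.pyGetD_eq_getElem _ _ h0 (by omega)
  have ht : (i + 1).toNat = i.toNat + 1 := by omega
  have h2 : PySem.List.pyGetD ll (i+1) (0,0,"") = ll[i.toNat + 1]'(by omega) := by
    have := PySem.List.pyGetD_eq_getElem ll (0,0,"") (i := i + 1) (by omega) (by omega)
    rw [this]
    simp [ht]
  simp only [aBody, aStep, goodPair, h1, h2, List.getElem_zip, List.getElem_drop]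
  simp [Nat.add_comm]

theorem create_dialogue_lists_spec_aux (ll : List (Int × Int × String)) :
    create_dialogue_lists ll = create_dialogue_lists_alt ll := by
  have hrange : PySem.List.pyRange 0 ((ll.length : Int) - 1) 1
      = PySem.List.pyRange 0 (((ll.zip (ll.drop 1)).length : Int)) 1 := by
    cases ll with
    | nil => simp [PySem.List.pyRange_one_eq_nil]
    | cons a t =>
      congr 1
      simp [List.length_zip]
  unfold create_dialogue_lists
  rw [hrange]
  have hcongr : (PySem.List.pyRange 0 (((ll.zip (ll.drop 1)).length : Int)) 1).foldl
      (aBody ll) ([], false)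
      = (PySem.List.pyRange 0 (((ll.zip (ll.drop 1)).length : Int)) 1).foldl
        (fun st i => aStep st (PySem.List.pyGetD (ll.zip (ll.drop 1)) i ((0,0,""),(0,0,"")))) ([], false) := by
    apply PySem.List.foldl_congr_mem
    intro st i hi
    rw [PySem.List.mem_pyRange_one] at hi
    exact aBody_eq_aStep ll st i hi.1 hi.2
  rw [hcongr, PySem.List.foldl_pyRange_zero_pyGetD']
  rw [foldl_aStep, List.nil_append]
  rw [← flatMap_contrib_eq_aRec (ll.zip (ll.drop 1)) false]
  rfl

-- ===== VERDICT (by name: the statement is the Claim_ definition above) =====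
theorem create_dialogue_lists_spec : Claim_equal_create_dialogue_lists := by
  intro ll _
  unfold Spec_create_dialogue_lists
  exact create_dialogue_lists_spec_aux ll
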